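-- pv_equiv track=rewrite | github.com/codyduong/hitokage | docs/gen_pages.py | read_comment
-- ===== SOURCE A (Python) =====
-- from typing import (
--     Annotated,
--     Callable,
--     List,
--     Literal,
--     Optional,
--     TextIO,
--     Tuple,
--     Union,
--     cast,
-- )
--
-- def read_comment(text: str, start_index: int) -> Tuple[str, str, int]:
--     i: int = start_index + 4
--     length: int = len(text)
--     comment_chars: List[str] = []
--     while i < length:
--         if i+2 < length and text[i:i+3] == '-->':
--             full_comment = text[start_index:i+3]
--             return ''.join(comment_chars), full_comment, i+3
--         comment_chars.append(text[i])
--         i += 1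
--     # malformed comment
--     full_comment = text[start_index:i]
--     return ''.join(comment_chars), full_comment, i
-- ===== SOURCE B (Python) =====
-- def read_comment(text, start_index):
--     j = start_index + 4
--     idx = text.find('-->', j)
--     if idx != -1:
--         return text[j:idx], text[start_index:idx + 3], idx + 3
--     end = max(j, len(text))
--     return text[j:], text[start_index:end], end
-- ===== Notes on version B (the rewrite author's own statement) =====
-- stated objective: simpler
-- what changed: Replaces A's character-by-character while-loop (accumulating a char list and re-slicing 3 chars at each position) with a single str.find('-->', start_index+4) followed by two slices; the malformed path returns the tail slice and max(start_index+4, len(text)).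
-- outside the precondition, e.g. on read_comment('<!--x-->', -8): A returns ('x--><!--x', '<!--x-->', 8), B returns ('x', '<!--x-->', 8)
import Mathlib
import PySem

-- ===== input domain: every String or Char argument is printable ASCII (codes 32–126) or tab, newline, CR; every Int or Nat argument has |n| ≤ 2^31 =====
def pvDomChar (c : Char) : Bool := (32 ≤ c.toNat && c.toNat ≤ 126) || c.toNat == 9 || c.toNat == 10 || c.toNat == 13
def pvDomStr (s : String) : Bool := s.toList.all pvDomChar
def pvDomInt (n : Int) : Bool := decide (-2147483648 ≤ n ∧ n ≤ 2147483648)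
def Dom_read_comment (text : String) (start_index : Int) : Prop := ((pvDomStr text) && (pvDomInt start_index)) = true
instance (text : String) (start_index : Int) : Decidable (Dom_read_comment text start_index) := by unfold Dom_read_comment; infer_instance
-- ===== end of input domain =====

-- B replaces A's char-by-char scan by one find('-->', start_index+4) plus slices (simpler); equal on the natural domain 0 ≤ start_index.

-- ===== PORT A =====
-- the while-loop of A: i scans upward, chars accumulates text[i]; exact PySem slicing/indexing
def readCommentGo (cs : List Char) (start_index : Int) (chars : List Char) (i : Int) :
    String × String × Int :=
  if _h : i < (cs.length : Int) then
    if (i + 2 < (cs.length : Int)) ∧ PySem.Chars.slice cs (some i) (some (i + 3)) = ['-', '-', '>'] then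
      (String.ofList chars, String.ofList (PySem.Chars.slice cs (some start_index) (some (i + 3))), i + 3)
    else
      match PySem.Chars.pyGet? cs i with
      | some c => readCommentGo cs start_index (chars ++ [c]) (i + 1)
      | none => (String.ofList chars, "", i)  -- Python raises IndexError here (i < -len); outside Pre_
  else
    (String.ofList chars, String.ofList (PySem.Chars.slice cs (some start_index) (some i)), i)
termination_by ((cs.length : Int) - i).toNat
decreasing_by omega

def read_comment (text : String) (start_index : Int) : String × String × Int :=
  readCommentGo text.toList start_index [] (start_index + 4)

-- ===== PORT B =====
def read_comment_alt (text : String) (start_index : Int) : String × String × Int :=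
  let cs := text.toList
  let j := start_index + 4
  let idx := PySem.Chars.findFrom cs ['-', '-', '>'] j none
  if idx ≠ -1 then
    (String.ofList (PySem.Chars.slice cs (some j) (some idx)),
     String.ofList (PySem.Chars.slice cs (some start_index) (some (idx + 3))), idx + 3)
  else
    let e := max j (cs.length : Int)
    (String.ofList (PySem.Chars.slice cs (some j) none),
     String.ofList (PySem.Chars.slice cs (some start_index) (some e)), e)

-- ===== PRECONDITION & SPEC =====
-- Pre_ restricts to the natural domain 0 ≤ start_index (an index of '<!--' in text): on negative
-- start_index A's negative-index wraparound returns accidental values or raises IndexError.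
def Pre_read_comment (text : String) (start_index : Int) : Prop := 0 ≤ start_index
instance (text : String) (start_index : Int) : Decidable (Pre_read_comment text start_index) := by unfold Pre_read_comment; infer_instance
def pvWitness_read_comment : String × Int := ("<!-- hi -->", 0)
def Spec_read_comment (text : String) (start_index : Int) (out : String × String × Int) : Prop := out = read_comment_alt text start_index
instance (text : String) (start_index : Int) (out : String × String × Int) : Decidable (Spec_read_comment text start_index out) := by unfold Spec_read_comment; infer_instance

-- ===== CLAIM (what is proved, stated in full; the proofs are below) =====
def Claim_equal_read_comment : Prop := ∀ (text : String) (start_index : Int), Dom_read_comment text start_index → Pre_read_comment text start_index → Spec_read_comment text start_index (read_comment text start_index)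


-- ===== LEMMAS AND PROOFS =====

-- first index k ≥ i at which '-->' starts in cs (proof-side search tree mirroring A's scan)
def firstOcc (cs : List Char) (i : Nat) : Option Nat :=
  if i < cs.length then
    if ['-', '-', '>'] <+: cs.drop i then some i else firstOcc cs (i + 1)
  else none
termination_by cs.length - i

-- the common canonical value both ports compute
def canonRC (cs : List Char) (s : Int) (chars : List Char) (i : Nat) : String × String × Int :=
  match firstOcc cs i with
  | some k => (String.ofList (chars ++ ((cs.drop i).take (k - i))),
               String.ofList (PySem.Chars.slice cs (some s) (some ((k : Int) + 3))), (k : Int) + 3)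
  | none => (String.ofList (chars ++ cs.drop i),
             String.ofList (PySem.Chars.slice cs (some s) (some (max (i : Int) (cs.length : Int)))),
             max (i : Int) (cs.length : Int))

theorem slice3_eq (cs : List Char) (i : Nat) :
    PySem.Chars.slice cs (some (i : Int)) (some ((i : Int) + 3)) = (cs.drop i).take 3 := by
  show PySem.List.slice cs (some (i : Int)) (some ((i : Int) + 3)) = (cs.drop i).take 3
  rw [PySem.List.slice_toNat (α := Char) cs (a := (i : Int)) (b := (i : Int) + 3) (by omega) (by omega)]
  congr 1
  omega

theorem cond_iff (cs : List Char) (i : Nat) :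
    (((i : Int) + 2 < (cs.length : Int)) ∧
      PySem.Chars.slice cs (some (i : Int)) (some ((i : Int) + 3)) = ['-', '-', '>'])
    ↔ ['-', '-', '>'] <+: cs.drop i := by
  rw [slice3_eq]
  constructor
  · rintro ⟨-, h⟩
    rw [List.prefix_iff_eq_take]
    exact h.symm
  · intro h
    have ht := (List.prefix_iff_eq_take.mp h).symm
    have hl := h.length_le
    simp only [List.length_drop, List.length_cons, List.length_nil] at hl
    exact ⟨by omega, ht⟩

theorem firstOcc_none_iff (cs : List Char) (i : Nat) :
    firstOcc cs i = none ↔ ∀ m, i ≤ m → ¬ ['-', '-', '>'] <+: cs.drop m := by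
  fun_induction firstOcc cs i with
  | case1 i hi hp =>
    simp only [reduceCtorEq, false_iff, not_forall]
    exact ⟨i, le_rfl, not_not_intro hp⟩
  | case2 i hi hp ih =>
    rw [ih]
    constructor
    · intro h m him
      rcases Nat.eq_or_lt_of_le him with rfl | hlt
      · exact hp
      · exact h m hlt
    · exact fun h m him => h m (by omega)
  | case3 i hi =>
    simp only [true_iff]
    intro m him hp
    rw [List.drop_eq_nil_of_le (by omega)] at hp
    exact absurd hp.length_le (by simp)

theorem firstOcc_some_spec (cs : List Char) (i k : Nat) (h : firstOcc cs i = some k) :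
    i ≤ k ∧ k < cs.length ∧ (['-', '-', '>'] <+: cs.drop k) ∧
      ∀ m, i ≤ m → m < k → ¬ ['-', '-', '>'] <+: cs.drop m := by
  fun_induction firstOcc cs i with
  | case1 i hi hp =>
    obtain rfl : i = k := by simpa using h
    exact ⟨le_rfl, hi, hp, fun m h1 h2 _ => absurd h1 (by omega)⟩
  | case2 i hi hp ih =>
    obtain ⟨h1, h2, h3, h4⟩ := ih h
    refine ⟨by omega, h2, h3, fun m hm1 hm2 => ?_⟩
    rcases Nat.eq_or_lt_of_le hm1 with rfl | hlt
    · exact hp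
    · exact h4 m hlt hm2
  | case3 i hi => exact absurd h (by simp)

theorem firstOcc_step (cs : List Char) (i : Nat) (hi : i < cs.length)
    (hp : ¬ ['-', '-', '>'] <+: cs.drop i) : firstOcc cs i = firstOcc cs (i + 1) := by
  rw [firstOcc, if_pos hi, if_neg hp]

theorem canon_step (cs : List Char) (s : Int) (chars : List Char) (i : Nat)
    (hi : i < cs.length) (hp : ¬ ['-', '-', '>'] <+: cs.drop i) :
    canonRC cs s (chars ++ [cs[i]]) (i + 1) = canonRC cs s chars i := by
  unfold canonRC
  rw [firstOcc_step cs i hi hp]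
  have hd : cs.drop i = cs[i] :: cs.drop (i + 1) := List.drop_eq_getElem_cons hi
  cases hfo : firstOcc cs (i + 1) with
  | none =>
    have hmax : max (((i + 1 : Nat)) : Int) (cs.length : Int) = max (i : Int) (cs.length : Int) := by
      push_cast; omega
    simp only [hd, List.append_assoc, List.singleton_append]
    rw [hmax]
  | some k =>
    have hk := (firstOcc_some_spec cs (i + 1) k hfo).1
    have hkk : k - i = (k - (i + 1)) + 1 := by omega
    simp only [hd, hkk, List.take_succ_cons, List.append_assoc, List.singleton_append]

theorem canon_base (cs : List Char) (s : Int) (chars : List Char) (i : Nat)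
    (hi : cs.length ≤ i) :
    canonRC cs s chars i =
      (String.ofList chars, String.ofList (PySem.Chars.slice cs (some s) (some (i : Int))), (i : Int)) := by
  have hfo : firstOcc cs i = none := by rw [firstOcc, if_neg (by omega)]
  have hmax : max (i : Int) (cs.length : Int) = (i : Int) := by omega
  unfold canonRC
  rw [hfo]
  simp only [List.drop_eq_nil_of_le hi, List.append_nil, hmax]

theorem readCommentGo_eq_canon (cs : List Char) (s : Int) (chars : List Char) (i : Nat) :
    readCommentGo cs s chars (i : Int) = canonRC cs s chars i := by
  suffices H : ∀ n, ∀ i chars, cs.length - i ≤ n →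
      readCommentGo cs s chars (i : Int) = canonRC cs s chars i from H _ i chars le_rfl
  intro n
  induction n with
  | zero =>
    intro i chars hle
    have hi : cs.length ≤ i := by omega
    rw [readCommentGo, dif_neg (by omega), canon_base cs s chars i hi]
  | succ n ih =>
    intro i chars hle
    by_cases hi : i < cs.length
    · rw [readCommentGo, dif_pos (by omega)]
      by_cases hp : ['-', '-', '>'] <+: cs.drop i
      · rw [if_pos ((cond_iff cs i).mpr hp)]
        have hfo : firstOcc cs i = some i := by rw [firstOcc, if_pos hi, if_pos hp]
        unfold canonRC
        rw [hfo]
        simp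
      · rw [if_neg (fun hc => hp ((cond_iff cs i).mp hc))]
        have hg : PySem.Chars.pyGet? cs (i : Int) = some cs[i] := by
          show PySem.List.pyGet? cs (i : Int) = some cs[i]
          rw [PySem.List.pyGet?_natCast, List.getElem?_eq_getElem hi]
        rw [hg]
        have hcast : (i : Int) + 1 = ((i + 1 : Nat) : Int) := by push_cast; ring
        show readCommentGo cs s (chars ++ [cs[i]]) ((i : Int) + 1) = canonRC cs s chars i
        rw [hcast, ih (i + 1) (chars ++ [cs[i]]) (by omega),
          canon_step cs s chars i hi hp]
    · rw [readCommentGo, dif_neg (by omega), canon_base cs s chars i (by omega)]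

theorem findFrom_past (cs : List Char) (j : Nat) (h : cs.length < j) :
    PySem.Chars.findFrom cs ['-', '-', '>'] (j : Int) none = -1 := by
  have h0 : ¬ ((j : Int) < 0) := by omega
  have h1 : ¬ ((j : Int) ≤ (cs.length : Int)) := by omega
  simp only [PySem.Chars.findFrom, if_neg h0]
  rw [if_pos (show (cs.length : Int) < (j : Int) by omega)]

theorem infix_from_firstOcc (cs : List Char) (j k : Nat) (hjk : j ≤ k)
    (hp : ['-', '-', '>'] <+: cs.drop k) : ['-', '-', '>'] <:+: cs.drop j := by
  rw [← PySem.Chars.isIn_iff_infix, ← PySem.Chars.exists_prefix_drop_iff_isIn]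
  exact ⟨k - j, by rwa [List.drop_drop, Nat.add_sub_cancel' hjk]⟩

theorem findFrom_eq_of_firstOcc (cs : List Char) (j k : Nat) (hj : j ≤ cs.length)
    (h : firstOcc cs j = some k) :
    PySem.Chars.findFrom cs ['-', '-', '>'] (j : Int) none = (k : Int) := by
  obtain ⟨hjk, hklen, hkp, hmin⟩ := firstOcc_some_spec cs j k h
  have hinf : ['-', '-', '>'] <:+: cs.drop j := infix_from_firstOcc cs j k hjk hkp
  have h0 : 0 ≤ PySem.Chars.find (cs.drop j) ['-', '-', '>'] :=
    (PySem.Chars.find_nonneg_iff _ _).mpr hinf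
  obtain ⟨hfp, hfmin⟩ := PySem.Chars.find_spec h0
  rw [List.drop_drop] at hfp
  have hocc : ['-', '-', '>'] <+: (cs.drop j).drop (k - j) := by
    rwa [List.drop_drop, Nat.add_sub_cancel' hjk]
  have hfk : (PySem.Chars.find (cs.drop j) ['-', '-', '>']).toNat = k - j := by
    by_contra hne
    rcases Nat.lt_or_ge (PySem.Chars.find (cs.drop j) ['-', '-', '>']).toNat (k - j) with hlt | hge
    · exact hmin (j + (PySem.Chars.find (cs.drop j) ['-', '-', '>']).toNat)
        (by omega) (by omega) hfp
    · exact hfmin (k - j) (by omega) hocc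
  rw [PySem.Chars.findFrom_natCast cs _ j hj,
    if_neg ((PySem.Chars.find_ne_neg_one_iff _ _).mpr hinf)]
  omega

theorem findFrom_neg_of_firstOcc (cs : List Char) (j : Nat)
    (h : firstOcc cs j = none) :
    PySem.Chars.findFrom cs ['-', '-', '>'] (j : Int) none = -1 := by
  rcases Nat.lt_or_ge cs.length j with hlt | hge
  · exact findFrom_past cs j hlt
  · rw [PySem.Chars.findFrom_natCast cs _ j hge, if_pos]
    rw [PySem.Chars.find_eq_neg_one_iff]
    intro hinf
    obtain ⟨m, hm⟩ := (PySem.Chars.exists_prefix_drop_iff_isIn _ _).mpr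
      ((PySem.Chars.isIn_iff_infix _ _).mpr hinf)
    rw [List.drop_drop] at hm
    exact (firstOcc_none_iff cs j).mp h (j + m) (by omega) hm

theorem alt_eq_canon (text : String) (s : Int) (hs : 0 ≤ s) :
    read_comment_alt text s = canonRC text.toList s [] (s + 4).toNat := by
  have hj : (((s + 4).toNat : Nat) : Int) = s + 4 := Int.toNat_of_nonneg (by omega)
  simp only [read_comment_alt]
  rw [← hj]
  generalize text.toList = cs
  generalize (s + 4).toNat = j
  simp only [Int.toNat_natCast]
  cases hfo : firstOcc cs j with
  | some k =>
    obtain ⟨hjk, hklen, -, -⟩ := firstOcc_some_spec cs j k hfo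
    rw [findFrom_eq_of_firstOcc cs j k (by omega) hfo,
      if_pos (show (k : Int) ≠ -1 by omega)]
    unfold canonRC
    rw [hfo]
    have hsl : PySem.Chars.slice cs (some (j : Int)) (some (k : Int)) = (cs.drop j).take (k - j) := by
      show PySem.List.slice cs (some (j : Int)) (some (k : Int)) = (cs.drop j).take (k - j)
      rw [PySem.List.slice_toNat (α := Char) cs (a := (j : Int)) (b := (k : Int)) (by omega) (by omega)]
      congr 1
    rw [hsl]
    simp
  | none =>
    rw [findFrom_neg_of_firstOcc cs j hfo]
    unfold canonRC
    rw [hfo]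
    simp only [ne_eq, not_true_eq_false, if_false, List.nil_append]
    have hdr : PySem.Chars.slice cs (some (j : Int)) none = cs.drop j := by
      show PySem.List.slice cs (some (j : Int)) none = cs.drop j
      rw [PySem.List.slice_some_none, PySem.List.clampIdx_natCast]
      rcases Nat.le_total j cs.length with hle | hle
      · rw [Nat.min_eq_left hle]
      · rw [Nat.min_eq_right hle, List.drop_eq_nil_of_le hle, List.drop_eq_nil_of_le le_rfl]
    rw [hdr]

-- ===== VERDICT (by name: the statement is the Claim_ definition above) =====
theorem read_comment_spec : Claim_equal_read_comment := by
  intro text s _hdom hpre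
  unfold Spec_read_comment
  have hs : 0 ≤ s := hpre
  have hcast : s + 4 = (((s + 4).toNat : Nat) : Int) := (Int.toNat_of_nonneg (by omega)).symm
  rw [read_comment, hcast, readCommentGo_eq_canon, alt_eq_canon text s hs]
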